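-- pv_equiv track=rewrite | github.com/prokokok/programmers | 힙/Lv3_게임아이템.py | solution
-- ===== SOURCE A (Python) =====
-- import heapq
-- import heapq
-- import heapq
--
-- def solution(healths, items):
--     # list comprehension을 사용한 heapify를 한줄에 하는 방법?
--     healths = [-health for health in healths]
--     items = [[-y, x, index + 1] for index, [x, y] in enumerate(items)]
--     heapq.heapify(healths)
--     heapq.heapify(items)
--
--     answer = []
--     while items:
--         health = healths[0]
--         item_health = items[0][0]
--
--         if item_health - health < 100:
--             heapq.heappop(items)
--         else:
--             answer.append(heapq.heappop(items)[2])
--             heapq.heappop(healths)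
--
--         if not healths:
--             break
--
--     if not answer:
--         answer = []
--     else:
--         answer.sort()
--
--     return answer
-- ===== SOURCE B (Python) =====
-- def solution(healths, items):
--     # Decision by rank counting: the k-th accepted item (0-based count `taken`) is
--     # equipped iff at least taken+1 players have health >= 100 + reduction.
--     keyed = sorted((-y, x, i + 1) for i, (x, y) in enumerate(items))
--     taken = 0
--     picked = []
--     for negy, _, idx in keyed:
--         if taken < sum(1 for h in healths if h + negy >= 100):
--             picked.append(idx)
--             taken += 1
--     return sorted(picked)
-- ===== Notes on version B (the rewrite author's own statement) =====
-- stated objective: alternative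
-- what changed: Replaced A's two max-heaps and pop-based matching (each accepted item consumes the current largest health) by a rank-counting rule: walk the items in key order (-reduction, cost, index) and accept an item iff the number already accepted is less than the count of healths >= 100+reduction; no health is ever matched or removed, only counted.
-- crash fix: When healths is empty but items is not, A raises IndexError reading healths[0]; B returns []. — e.g. on solution([], [[1, 2]]): A raises IndexError, B returns []
import Mathlib
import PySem

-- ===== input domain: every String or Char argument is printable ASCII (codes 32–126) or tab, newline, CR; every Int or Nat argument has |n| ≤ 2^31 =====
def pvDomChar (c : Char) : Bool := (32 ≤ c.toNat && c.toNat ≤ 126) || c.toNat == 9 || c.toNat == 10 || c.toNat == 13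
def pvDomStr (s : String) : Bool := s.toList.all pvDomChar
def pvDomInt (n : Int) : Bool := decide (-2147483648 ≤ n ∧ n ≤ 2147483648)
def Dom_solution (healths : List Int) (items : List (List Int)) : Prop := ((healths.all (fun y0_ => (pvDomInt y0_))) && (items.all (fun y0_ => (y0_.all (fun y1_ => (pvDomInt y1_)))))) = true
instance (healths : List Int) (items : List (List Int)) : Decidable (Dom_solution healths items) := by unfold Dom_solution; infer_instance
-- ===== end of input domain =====

-- B replaces A's two max-heaps and pop-based matching by a rank-counting rule over the
-- key-sorted items: accept an item iff (number already accepted) < #{h ∈ healths | h ≥ 100+y};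
-- no health is ever matched or removed (objective: alternative). Equivalence is about the
-- return value; A only rebinds its parameters locally.

-- Both programs build the same triples [-y, x, index+1] from the items; Python compares such
-- int lists lexicographically, which is exactly Mathlib's linear order on List Int.
def pyItemTriples (items : List (List Int)) : List (List Int) :=
  (PySem.List.enumerate items).map
    (fun p => [-(p.2.getD 1 0), p.2.getD 0 0, p.1 + 1])

-- ===== PORT A =====
-- heapq is ported by its observable semantics, which is exact here: heap[0] is the minimum
-- of the heap's elements, heappop removes it (List.min? / List.erase of the minimum); no
-- other aspect of the heap's layout is observable in A.  The while loop is structural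
-- recursion with fuel = number of items, exact because each iteration pops one item.
def heapLoopA : Nat → List Int → List (List Int) → List Int → List Int
  | 0, _, _, ans => ans
  | fuel+1, hs, its, ans =>
    match its.min? with
    | none => ans                                   -- while items: exit
    | some m =>
      let health := hs.min?.getD 0                  -- healths[0] (Pre_ excludes the IndexError)
      let its' := its.erase m
      if m.getD 0 0 - health < 100 then
        if hs = [] then ans else heapLoopA fuel hs its' ans
      else
        let ans' := ans ++ [m.getD 2 0]             -- answer.append(heappop(items)[2])
        let hs' := hs.erase health                  -- heappop(healths)
        if hs' = [] then ans' else heapLoopA fuel hs' its' ans'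

def solution (healths : List Int) (items : List (List Int)) : List Int :=
  let negH := healths.map (fun h => -h)
  let trips := pyItemTriples items
  let ans := heapLoopA trips.length negH trips []
  if ans = [] then [] else PySem.List.sorted ans (fun x => x) false

-- ===== PORT B =====
-- Source B's loop: walk the key-sorted triples with the counter `taken`; the inner
-- 'sum(1 for h in healths if h + negy >= 100)' is List.countP over the untouched healths.
def scanCnt : Nat → List Int → List (List Int) → List Int
  | _, _, [] => []
  | taken, healths, t :: ts =>
    if taken < healths.countP (fun h => decide (h + t.getD 0 0 ≥ 100)) then
      t.getD 2 0 :: scanCnt (taken + 1) healths ts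
    else scanCnt taken healths ts

def solution_alt (healths : List Int) (items : List (List Int)) : List Int :=
  let keyed := PySem.List.sorted (pyItemTriples items) (fun k => k) false
  PySem.List.sorted (scanCnt 0 healths keyed) (fun x => x) false

-- ===== PRECONDITION & SPEC =====
-- A raises IndexError when healths is empty but items is not, and ValueError when some item
-- does not have exactly two entries; Pre_ excludes exactly those inputs.
def Pre_solution (healths : List Int) (items : List (List Int)) : Prop :=
  (items = [] ∨ healths ≠ []) ∧ ∀ it ∈ items, it.length = 2
instance (healths : List Int) (items : List (List Int)) : Decidable (Pre_solution healths items) := by unfold Pre_solution; infer_instance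

def pvWitness_solution : List Int × List (List Int) := ([150], [[10, 60]])

-- When healths is empty but items is not, A raises IndexError reading healths[0]; B returns [].
def Raises_solution (healths : List Int) (items : List (List Int)) : Prop :=
  healths = [] ∧ items ≠ [] ∧ ∀ it ∈ items, it.length = 2
instance (healths : List Int) (items : List (List Int)) : Decidable (Raises_solution healths items) := by unfold Raises_solution; infer_instance
def pvRaiseWitness_solution : List Int × List (List Int) := ([], [[1, 2]])
def pvRaiseWitnessOut_solution : List Int := []

def Spec_solution (healths : List Int) (items : List (List Int)) (out : List Int) : Prop := out = solution_alt healths items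
instance (healths : List Int) (items : List (List Int)) (out : List Int) : Decidable (Spec_solution healths items out) := by unfold Spec_solution; infer_instance

-- ===== CLAIM (what is proved, stated in full; the proofs are below) =====
def Claim_equal_solution : Prop := ∀ (healths : List Int) (items : List (List Int)), Dom_solution healths items → Pre_solution healths items → Spec_solution healths items (solution healths items)

def Claim_raises_solution : Prop := (∀ (healths : List Int) (items : List (List Int)), Dom_solution healths items → Raises_solution healths items → ¬ Pre_solution healths items) ∧ (Dom_solution (pvRaiseWitness_solution.1) (pvRaiseWitness_solution.2) ∧ Raises_solution (pvRaiseWitness_solution.1) (pvRaiseWitness_solution.2) ∧ solution_alt (pvRaiseWitness_solution.1) (pvRaiseWitness_solution.2) = pvRaiseWitnessOut_solution)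

-- ===== LEMMAS AND PROOFS =====

-- proof-only intermediate: A's heap loop read through sorted views of its two heaps is a
-- pointer scan over the descending healths; then the pointer scan is B's counting scan.
def scanPtr : List Int → List (List Int) → List Int
  | _, [] => []
  | [], _ :: _ => []
  | h :: hs', t :: ts =>
    if h + t.getD 0 0 ≥ 100 then t.getD 2 0 :: scanPtr hs' ts
    else scanPtr (h :: hs') ts

-- PySem.List.sorted's Decidable argument is proof-irrelevant (bridges the default instances
-- the ports elaborate with to the LinearOrder-derived ones the order lemmas are stated with)
lemma sorted_inst_irrel {α κ : Type} [LT κ] (d1 d2 : (a b : κ) → Decidable (a < b)) (xs : List α) (key : α → κ) (rev : Bool) :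
    @PySem.List.sorted α κ _ d1 xs key rev = @PySem.List.sorted α κ _ d2 xs key rev := by
  have h : d1 = d2 := by funext a b; exact Subsingleton.elim _ _
  rw [h]

-- head of the id-sorted list is the Python heap's peek (the minimum)
lemma sorted_head_min {α : Type} [LinearOrder α] {l : List α} {m : α} {t : List α}
    (h : PySem.List.sorted l (fun x => x) false = m :: t) : l.min? = some m := by
  have hp : (m :: t).Perm l := h ▸ PySem.List.sorted_perm l (fun x => x) false
  have hmem : m ∈ l := hp.mem_iff.mp (List.mem_cons_self)
  have hle : ∀ y ∈ l, m ≤ y := PySem.List.key_head_sorted_le l (fun x => x) h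
  rw [List.min?_eq_some_iff]
  exact ⟨hmem, hle⟩

-- popping the minimum (heappop) sorts to the tail of the sorted list
lemma sorted_erase_min {α : Type} [LinearOrder α] [BEq α] [LawfulBEq α] {l : List α} {m : α} {t : List α}
    (h : PySem.List.sorted l (fun x => x) false = m :: t) :
    PySem.List.sorted (l.erase m) (fun x => x) false = t := by
  have hp : l.Perm (m :: t) := (h ▸ PySem.List.sorted_perm l (fun x => x) false).symm
  have hperm : t.Perm (l.erase m) := by
    have := hp.erase m
    simpa using this.symm
  have hpw : t.Pairwise (fun a b => a ≤ b) := by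
    have := PySem.List.sorted_pairwise l (fun x => x)
    rw [h] at this
    exact this.tail
  exact PySem.List.sorted_id_eq_of_perm_of_pairwise _ _ hperm hpw

-- the two previous lemmas at the item-triple type, with the instances the ports elaborate with
lemma sorted_head_minL {l : List (List Int)} {m : List Int} {t : List (List Int)}
    (h : PySem.List.sorted l (fun x => x) false = m :: t) : l.min? = some m :=
  sorted_head_min ((sorted_inst_irrel _ _ _ _ _).symm.trans h)

lemma sorted_erase_minL {l : List (List Int)} {m : List Int} {t : List (List Int)}
    (h : PySem.List.sorted l (fun x => x) false = m :: t) :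
    PySem.List.sorted (l.erase m) (fun x => x) false = t :=
  (sorted_inst_irrel _ _ _ _ _).trans (sorted_erase_min ((sorted_inst_irrel _ _ _ _ _).symm.trans h))

lemma scanPtr_nil_right (hs : List Int) : scanPtr hs [] = [] := by
  cases hs <;> rfl

lemma scanPtr_nil_left (ts : List (List Int)) : scanPtr [] ts = [] := by
  cases ts <;> rfl

-- the heap loop of A, read through sorted views of its two heaps, is the pointer scan
lemma heapLoopA_eq (fuel : Nat) : ∀ (hs : List Int) (its : List (List Int)) (ans : List Int),
    its.length ≤ fuel → (hs ≠ [] ∨ its = []) →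
    heapLoopA fuel hs its ans
      = ans ++ scanPtr ((PySem.List.sorted hs (fun x => x) false).map (fun h => -h))
                       (PySem.List.sorted its (fun k => k) false) := by
  induction fuel with
  | zero =>
    intro hs its ans hlen _
    have hnil : its = [] := List.eq_nil_of_length_eq_zero (Nat.le_zero.mp hlen)
    subst hnil
    rw [show (PySem.List.sorted ([] : List (List Int)) (fun k => k) false) = [] from rfl]
    simp [heapLoopA, scanPtr_nil_right]
  | succ fuel ih =>
    intro hs its ans hlen hpre
    cases hsi : PySem.List.sorted its (fun k => k) false with
    | nil =>
      have hnil : its = [] := (PySem.List.sorted_eq_nil_iff _ _ _).mp hsi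
      subst hnil
      simp [heapLoopA, scanPtr_nil_right]
    | cons m ts' =>
      have hits_ne : its ≠ [] := by
        intro h
        subst h
        have h' : ([] : List (List Int)) = m :: ts' := hsi
        simp at h'
      have hhs : hs ≠ [] := hpre.resolve_right hits_ne
      have hmin : its.min? = some m := sorted_head_minL hsi
      cases hsh : PySem.List.sorted hs (fun x => x) false with
      | nil => exact absurd ((PySem.List.sorted_eq_nil_iff _ _ _).mp hsh) hhs
      | cons h0 hrest =>
        have hmins : hs.min? = some h0 := sorted_head_min hsh
        have hlen' : (its.erase m).length ≤ fuel := by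
          have hm : m ∈ its := List.min?_mem hmin
          rw [List.length_erase_of_mem hm]
          have := List.length_pos_of_mem hm
          omega
        have hts' : PySem.List.sorted (its.erase m) (fun k => k) false = ts' := sorted_erase_minL hsi
        have hrest' : PySem.List.sorted (hs.erase h0) (fun x => x) false = hrest := sorted_erase_min hsh
        simp only [heapLoopA, hmin, hmins, Option.getD_some, scanPtr, List.map_cons]
        by_cases hc : m.getD 0 0 - h0 < 100
        · -- item too weak: discard it, healths untouched
          have hc' : ¬ (-h0 + m.getD 0 0 ≥ 100) := by omega
          rw [if_pos hc, if_neg hhs, if_neg hc', ih hs (its.erase m) ans hlen' (Or.inl hhs), hts', hsh]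
          simp
        · -- equip: take the item's index and pop the largest health
          have hc' : -h0 + m.getD 0 0 ≥ 100 := by omega
          rw [if_neg hc, if_pos hc']
          by_cases hhe : hs.erase h0 = []
          · rw [if_pos hhe]
            rw [hhe] at hrest'
            have : hrest = [] := by
              rw [hrest'.symm]; rfl
            simp [this, scanPtr_nil_left]
          · rw [if_neg hhe, ih (hs.erase h0) (its.erase m) _ hlen' (Or.inl hhe), hts', hrest']
            simp

-- on a descending list, 'element at position taken satisfies h + negy ≥ 100' is exactly
-- 'taken < number of elements with h + negy ≥ 100' (accepted elements form a prefix)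
lemma cnt_iff (negy : Int) : ∀ (D : List Int), D.Pairwise (fun a b => b ≤ a) →
    ∀ taken : Nat,
      (taken < D.countP (fun h => decide (h + negy ≥ 100)))
        ↔ (∃ h, D[taken]? = some h ∧ h + negy ≥ 100) := by
  intro D
  induction D with
  | nil => intro _ taken; simp
  | cons d D' ih =>
    intro hpw taken
    have hd : ∀ x ∈ D', x ≤ d := fun x hx => List.rel_of_pairwise_cons hpw hx
    have htail := ih hpw.tail
    by_cases hpd : d + negy ≥ 100
    · cases taken with
      | zero => simp [hpd]
      | succ n =>
        rw [List.countP_cons]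
        simp only [hpd, decide_true, if_pos]
        have : (n + 1 < D'.countP (fun h => decide (h + negy ≥ 100)) + 1)
            ↔ (n < D'.countP (fun h => decide (h + negy ≥ 100))) := by omega
        rw [show ((d :: D')[n+1]? ) = D'[n]? from rfl]
        exact this.trans (htail n)
    · have hz : (d :: D').countP (fun h => decide (h + negy ≥ 100)) = 0 := by
        rw [List.countP_eq_zero]
        intro x hx
        rcases List.mem_cons.mp hx with rfl | hx'
        · simpa using hpd
        · have := hd x hx'
          simp only [decide_eq_true_eq]
          omega
      rw [hz]
      simp only [Nat.not_lt_zero, false_iff]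
      rintro ⟨h, hget, hge⟩
      have hmem : h ∈ d :: D' := List.mem_of_getElem? hget
      rcases List.mem_cons.mp hmem with rfl | hx'
      · exact hpd hge
      · have := hd h hx'
        omega

-- the pointer scan over the descending healths equals B's counting scan
lemma ptr_eq_cnt (D healths : List Int) (hpw : D.Pairwise (fun a b => b ≤ a))
    (hperm : D.Perm healths) :
    ∀ (ts : List (List Int)) (taken : Nat),
      scanPtr (D.drop taken) ts = scanCnt taken healths ts := by
  intro ts
  induction ts with
  | nil => intro taken; simp [scanPtr_nil_right, scanCnt]
  | cons t ts ih =>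
    intro taken
    have hcnt : healths.countP (fun h => decide (h + t.getD 0 0 ≥ 100))
        = D.countP (fun h => decide (h + t.getD 0 0 ≥ 100)) := (hperm.countP_eq _).symm
    have hiff := cnt_iff (t.getD 0 0) D hpw taken
    cases hdrop : D.drop taken with
    | nil =>
      have hnone : D[taken]? = none := by rw [← List.head?_drop, hdrop]; rfl
      have hnot : ¬ taken < healths.countP (fun h => decide (h + t.getD 0 0 ≥ 100)) := by
        rw [hcnt]
        intro hlt
        rcases hiff.mp hlt with ⟨h, hget, _⟩
        rw [hnone] at hget
        cases hget
      rw [scanPtr_nil_left]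
      simp only [scanCnt, if_neg hnot]
      rw [← ih taken, hdrop, scanPtr_nil_left]
    | cons h0 rest =>
      have hget : D[taken]? = some h0 := by rw [← List.head?_drop, hdrop]; rfl
      have hrest : D.drop (taken + 1) = rest := by
        rw [← List.tail_drop, hdrop]
        rfl
      simp only [scanPtr, scanCnt, hcnt]
      by_cases hc : h0 + t.getD 0 0 ≥ 100
      · have hlt : taken < D.countP (fun h => decide (h + t.getD 0 0 ≥ 100)) :=
          hiff.mpr ⟨h0, hget, hc⟩
        rw [if_pos hc, if_pos hlt, ← hrest, ih (taken + 1)]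
      · have hnlt : ¬ taken < D.countP (fun h => decide (h + t.getD 0 0 ≥ 100)) := by
          intro hlt
          rcases hiff.mp hlt with ⟨h, hg, hge⟩
          rw [hget] at hg
          exact hc (Option.some.inj hg ▸ hge)
        rw [if_neg hc, if_neg hnlt, ← hdrop, ih taken]

-- the descending view of healths used above: pairwise ≥ and a permutation of healths
lemma descView_pairwise (healths : List Int) :
    ((PySem.List.sorted (healths.map (fun h => -h)) (fun x => x) false).map (fun h => -h)).Pairwise
      (fun a b => b ≤ a) := by
  have := PySem.List.sorted_pairwise (healths.map (fun h => -h)) (fun x => x)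
  exact List.pairwise_map.mpr (this.imp (by intro a b hab; omega))

lemma descView_perm (healths : List Int) :
    ((PySem.List.sorted (healths.map (fun h => -h)) (fun x => x) false).map (fun h => -h)).Perm healths := by
  have := (PySem.List.sorted_perm (healths.map (fun h => -h)) (fun x => x) false).map (fun h => -h)
  simpa [Function.comp] using this

theorem solution_spec : Claim_equal_solution := by
  intro healths items _ hpre
  obtain ⟨hp1, _⟩ := hpre
  unfold Spec_solution
  show (if heapLoopA (pyItemTriples items).length (healths.map (fun h => -h)) (pyItemTriples items) [] = [] then []
        else PySem.List.sorted (heapLoopA (pyItemTriples items).length (healths.map (fun h => -h)) (pyItemTriples items) []) (fun x => x) false)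
      = PySem.List.sorted (scanCnt 0 healths (PySem.List.sorted (pyItemTriples items) (fun k => k) false)) (fun x => x) false
  have hside : healths.map (fun h => -h) ≠ [] ∨ pyItemTriples items = [] := by
    rcases hp1 with h | h
    · right; simp [pyItemTriples, h]
    · left; simpa using h
  rw [heapLoopA_eq (pyItemTriples items).length (healths.map (fun h => -h)) (pyItemTriples items) [] le_rfl hside]
  have hD := ptr_eq_cnt ((PySem.List.sorted (healths.map (fun h => -h)) (fun x => x) false).map (fun h => -h))
      healths (descView_pairwise healths) (descView_perm healths)
      (PySem.List.sorted (pyItemTriples items) (fun k => k) false) 0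
  rw [List.drop_zero] at hD
  rw [hD]
  simp only [List.nil_append]
  by_cases hch : scanCnt 0 healths (PySem.List.sorted (pyItemTriples items) (fun k => k) false) = []
  · rw [if_pos hch, hch]
    rfl
  · rw [if_neg hch]

@[simp]
theorem solution_raises : Claim_raises_solution := by
  unfold Claim_raises_solution
  constructor
  · intro healths items _ hr hpre
    exact (hpre.1.resolve_left hr.2.1) hr.1
  · exact ⟨by decide, by decide, by decide⟩
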